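-- pv_equiv track=rewrite | github.com/astraldawn/aoc2019 | aoc9.py | handle_complex_opcode
-- ===== SOURCE A (Python) =====
-- opcode_argmode_map = {
--     1: [0, 0, 1],
--     2: [0, 0, 1],
--     3: [1],
--     4: [0],
--     5: [0, 0],
--     6: [0, 0],
--     7: [0, 0, 1],
--     8: [0, 0, 1],
--     9: [0],
-- }
--
-- def handle_complex_opcode(cur_opcode):
--     cur_opcode = str(cur_opcode)
--     actual_opcode = int(cur_opcode[-2:])
--     remaining_code = [int(x) for x in cur_opcode[:-2]][::-1]
--
--     default_args = opcode_argmode_map[actual_opcode]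
--     if len(remaining_code) < len(default_args):
--         for i in range(len(remaining_code), len(default_args)):
--             remaining_code.append(default_args[i])
--
--     args_mode_list = remaining_code
--     return actual_opcode, args_mode_list
-- ===== SOURCE B (Python) =====
-- opcode_argmode_map = {
--     1: [0, 0, 1],
--     2: [0, 0, 1],
--     3: [1],
--     4: [0],
--     5: [0, 0],
--     6: [0, 0],
--     7: [0, 0, 1],
--     8: [0, 0, 1],
--     9: [0],
-- }
--
-- def handle_complex_opcode(cur_opcode):
--     actual_opcode = cur_opcode % 100
--     n = cur_opcode // 100
--     modes = []
--     while n: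
--         modes.append(n % 10)
--         n //= 10
--     default_args = opcode_argmode_map[actual_opcode]
--     return actual_opcode, modes + default_args[len(modes):]
-- ===== Notes on version B (the rewrite author's own statement) =====
-- stated objective: alternative
-- what changed: B extracts the opcode and mode digits with integer arithmetic (% 100, // 100, a low-order-first digit loop) instead of A's str()/slicing/int()-per-character/reversal, and pads by appending one tail slice of the default list instead of A's index loop.
-- outside the precondition, e.g. on handle_complex_opcode(0): A raises KeyError, B raises KeyError; on handle_complex_opcode(110): A raises KeyError, B raises KeyError
import Mathlib
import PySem

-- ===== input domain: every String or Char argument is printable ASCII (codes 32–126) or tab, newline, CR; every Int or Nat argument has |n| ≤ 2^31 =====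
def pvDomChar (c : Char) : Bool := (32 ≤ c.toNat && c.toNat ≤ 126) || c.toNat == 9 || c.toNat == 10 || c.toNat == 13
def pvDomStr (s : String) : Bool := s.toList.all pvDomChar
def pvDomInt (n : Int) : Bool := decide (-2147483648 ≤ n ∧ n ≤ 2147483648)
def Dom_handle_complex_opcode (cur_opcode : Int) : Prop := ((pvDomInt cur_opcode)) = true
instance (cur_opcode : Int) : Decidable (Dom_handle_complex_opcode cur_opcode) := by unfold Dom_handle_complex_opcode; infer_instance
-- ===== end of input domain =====

-- B replaces A's string slicing/parsing by integer arithmetic (% and //, low-order-first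
-- digit loop) and replaces the element-by-element padding loop by one tail slice (idiomatic).

-- module constant opcode_argmode_map (shared by both sources)
def argmodeMap : PySem.Dict Int (List Int) :=
  PySem.Dict.ofList [(1, [0, 0, 1]), (2, [0, 0, 1]), (3, [1]), (4, [0]),
                     (5, [0, 0]), (6, [0, 0]), (7, [0, 0, 1]), (8, [0, 0, 1]), (9, [0])]

-- ===== PORT A =====
-- literal transliteration of A: str(n), s[-2:], s[:-2], [int(x) for x]), [::-1], pad loop.
-- The .getD fallbacks are exactly where Python raises (ValueError/KeyError); Pre_ excludes them.
def handle_complex_opcode (cur_opcode : Int) : Int × List Int :=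
  let s : List Char := PySem.Int.toChars cur_opcode
  let actual_opcode : Int := (PySem.Int.ofChars? (PySem.List.slice s (some (-2)) none)).getD 0
  let remaining_code : List Int :=
    (PySem.List.slice? ((PySem.List.slice s none (some (-2))).map
        (fun c => (PySem.Int.ofChars? [c]).getD 0)) none none (-1)).getD []
  let default_args : List Int := (argmodeMap.get? actual_opcode).getD []
  let remaining_code :=
    if remaining_code.length < default_args.length then
      (PySem.List.pyRange (remaining_code.length : Int) (default_args.length : Int) 1).foldl
        (fun acc i => acc ++ [PySem.List.pyGetD default_args i 0]) remaining_code
    else remaining_code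
  (actual_opcode, remaining_code)

-- ===== PORT B =====
-- B's 'while n: modes.append(n % 10); n //= 10' loop; exact for n ≥ 0 (inside Pre_ the
-- loop variable is nonnegative; on negative n the Python loop would not terminate).
def altDigits (m : Nat) : List Int :=
  if m = 0 then [] else ((m % 10 : Nat) : Int) :: altDigits (m / 10)

def handle_complex_opcode_alt (cur_opcode : Int) : Int × List Int :=
  let actual_opcode : Int := PySem.Int.mod cur_opcode 100
  let n : Int := PySem.Int.floordiv cur_opcode 100
  let modes : List Int := altDigits n.toNat
  let default_args : List Int := (argmodeMap.get? actual_opcode).getD []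
  (actual_opcode, modes ++ PySem.List.slice default_args (some (modes.length : Int)) none)

-- ===== PRECONDITION & SPEC =====
-- Pre_ = exactly where the Python A returns: cur_opcode ≥ 0 (else int() hits '-' / the sign
-- reaches the dict key) and its last two decimal digits form a key of opcode_argmode_map
-- (1..9); outside, A raises ValueError or KeyError.
def Pre_handle_complex_opcode (cur_opcode : Int) : Prop :=
  0 ≤ cur_opcode ∧ 1 ≤ PySem.Int.mod cur_opcode 100 ∧ PySem.Int.mod cur_opcode 100 ≤ 9
instance (cur_opcode : Int) : Decidable (Pre_handle_complex_opcode cur_opcode) := by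
  unfold Pre_handle_complex_opcode; infer_instance

def pvWitness_handle_complex_opcode : Int := 1002

def Spec_handle_complex_opcode (cur_opcode : Int) (out : Int × List Int) : Prop :=
  out = handle_complex_opcode_alt cur_opcode
instance (cur_opcode : Int) (out : Int × List Int) : Decidable (Spec_handle_complex_opcode cur_opcode out) := by
  unfold Spec_handle_complex_opcode; infer_instance

-- ===== CLAIM (what is proved, stated in full; the proofs are below) =====
def Claim_equal_handle_complex_opcode : Prop := ∀ (cur_opcode : Int), Dom_handle_complex_opcode cur_opcode → Pre_handle_complex_opcode cur_opcode → Spec_handle_complex_opcode cur_opcode (handle_complex_opcode cur_opcode)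

-- ===== LEMMAS AND PROOFS =====

-- B's digit loop produces Nat.digits 10, cast to Int.
theorem altDigits_eq_digits (m : Nat) :
    altDigits m = (Nat.digits 10 m).map (fun k => (k : Int)) := by
  induction m using Nat.strong_induction_on with
  | _ m ih =>
    rw [altDigits]
    by_cases h : m = 0
    · simp [h]
    · rw [Nat.digits_def' (by norm_num : 1 < 10) (Nat.pos_of_ne_zero h)]
      simp [h, ih (m / 10) (Nat.div_lt_self (Nat.pos_of_ne_zero h) (by norm_num))]

-- core's Nat.toDigits emits the decimal digits big-endian.
theorem toDigitsCore_eq (fuel : Nat) : ∀ (m : Nat) (acc : List Char), m < fuel →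
    Nat.toDigitsCore 10 fuel m acc =
      (if m = 0 then [Nat.digitChar 0] else ((Nat.digits 10 m).map Nat.digitChar).reverse) ++ acc := by
  induction fuel with
  | zero => intro m acc h; omega
  | succ f ih =>
    intro m acc h
    rw [Nat.toDigitsCore]
    by_cases h0 : m = 0
    · simp [h0]
    by_cases hlt : m / 10 = 0
    · have hm : m < 10 := by omega
      simp only [hlt]
      rw [Nat.digits_def' (by norm_num : 1 < 10) (Nat.pos_of_ne_zero h0), hlt]
      simp [Nat.mod_eq_of_lt hm, h0]
    · simp only [hlt]
      rw [ih (m / 10) _ (by omega)]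
      rw [Nat.digits_def' (by norm_num : 1 < 10) (Nat.pos_of_ne_zero h0)]
      simp [hlt, h0]

theorem toDigits_eq_pos (m : Nat) (hm : 0 < m) :
    Nat.toDigits 10 m = ((Nat.digits 10 m).map Nat.digitChar).reverse := by
  rw [Nat.toDigits, toDigitsCore_eq (m + 1) m [] (by omega)]
  simp [Nat.pos_iff_ne_zero.mp hm]

-- int(c) on a single decimal digit char
theorem parse_digitChar (k : Nat) (hk : k < 10) :
    PySem.Int.ofChars? [Nat.digitChar k] = some (k : Int) := by
  interval_cases k <;> decide

-- mapping int(c) over a list of digit chars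
theorem parse_map (L : List Nat) (hL : ∀ k ∈ L, k < 10) :
    (L.map Nat.digitChar).map (fun c => (PySem.Int.ofChars? [c]).getD 0) =
      L.map (fun k => (k : Int)) := by
  induction L with
  | nil => rfl
  | cons a t ih =>
    have ha : (PySem.Int.ofChars? [Nat.digitChar a]).getD 0 = (a : Int) := by
      simp [parse_digitChar a (hL a (by simp))]
    simp [ha, ih (fun k hk => hL k (by simp [hk]))]

-- int("0" + digit)
theorem parse_two (d : Nat) (h1 : 1 ≤ d) (h9 : d ≤ 9) :
    PySem.Int.ofChars? ['0', Nat.digitChar d] = some (d : Int) := by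
  interval_cases d <;> decide

-- ===== VERDICT (by name: the statement is the Claim_ definition above) =====
theorem handle_complex_opcode_spec : Claim_equal_handle_complex_opcode := by
  intro n _ hpre
  obtain ⟨hn, h1, h9⟩ := hpre
  unfold Spec_handle_complex_opcode
  obtain ⟨m, rfl⟩ : ∃ m : Nat, n = (m : Int) := ⟨n.toNat, (Int.toNat_of_nonneg hn).symm⟩
  have hmod : PySem.Int.mod (m : Int) 100 = ((m % 100 : Nat) : Int) := by
    exact_mod_cast PySem.Int.mod_natCast m 100
  rw [hmod] at h1 h9
  set d := m % 100 with hd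
  have hd1 : 1 ≤ d := by exact_mod_cast h1
  have hd9 : d ≤ 9 := by exact_mod_cast h9
  set r := m / 100 with hr
  -- the string side of A
  have hs : PySem.Int.toChars (m : Int) = Nat.toDigits 10 m := by
    simp [PySem.Int.toChars, show ¬ ((m:Int) < 0) by omega]
  -- B reduces to (d, altDigits r ++ tail-slice of the defaults)
  have hflo : PySem.Int.floordiv (m : Int) 100 = ((r : Nat) : Int) := by
    exact_mod_cast PySem.Int.floordiv_natCast m 100
  have hB : handle_complex_opcode_alt (m : Int) =
      ((d : Int), altDigits r ++ PySem.List.slice ((argmodeMap.get? (d : Int)).getD [])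
        (some ((altDigits r).length : Int)) none) := by
    unfold handle_complex_opcode_alt
    simp only [hmod, hflo, Int.toNat_natCast]
  rw [hB]
  -- the characters of str(m): prefix cs, then the last (one or two) digits
  have hdig_lt : ∀ k ∈ Nat.digits 10 r, k < 10 :=
    fun k hk => Nat.digits_lt_base (by norm_num) hk
  have hA_pieces :
      (PySem.Int.ofChars? (PySem.List.slice (PySem.Int.toChars (m:Int)) (some (-2)) none)).getD 0
        = (d : Int) ∧
      (PySem.List.slice (PySem.Int.toChars (m:Int)) none (some (-2))).map
          (fun c => (PySem.Int.ofChars? [c]).getD 0)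
        = ((Nat.digits 10 r).map (fun k => (k : Int))).reverse := by
    rw [hs]
    by_cases hr0 : r = 0
    · -- m is a single digit d
      have hmd : m = d := by omega
      have hdig : Nat.digits 10 m = [m] := by
        rw [Nat.digits_def' (by norm_num : 1 < 10) (by omega)]
        rw [(by omega : m % 10 = m), (by omega : m / 10 = 0)]
        simp
      rw [toDigits_eq_pos m (by omega), hdig]
      simp only [List.map_cons, List.map_nil, List.reverse_cons, List.reverse_nil,
        List.nil_append]
      constructor
      · rw [PySem.List.slice_from_neg_ofNat _ 2 (by omega)]
        simp [hmd, parse_digitChar d (by omega)]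
      · rw [PySem.List.slice_to_neg_ofNat _ 2 (by omega)]
        simp [hr0]
    · -- m = 100*r + d with r > 0: digits are d :: 0 :: digits r
      have hdig : Nat.digits 10 m = d :: 0 :: Nat.digits 10 r := by
        rw [Nat.digits_def' (by norm_num : 1 < 10) (by omega),
            (by omega : m % 10 = d), (by omega : m / 10 = 10 * r),
            Nat.digits_def' (by norm_num : 1 < 10) (by omega),
            (by omega : 10 * r % 10 = 0), (by omega : 10 * r / 10 = r)]
      rw [toDigits_eq_pos m (by omega), hdig]
      set cs := ((Nat.digits 10 r).map Nat.digitChar).reverse with hcs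
      have hshape : ((d :: 0 :: Nat.digits 10 r).map Nat.digitChar).reverse
          = cs ++ [Nat.digitChar 0, Nat.digitChar d] := by simp [hcs]
      rw [hshape]
      have hlen2 : (cs ++ [Nat.digitChar 0, Nat.digitChar d]).length - 2 = cs.length := by
        simp
      constructor
      · rw [PySem.List.slice_from_neg_ofNat _ 2 (by omega), hlen2, List.drop_left]
        have : Nat.digitChar 0 = '0' := rfl
        rw [this, parse_two d hd1 hd9]
        rfl
      · rw [PySem.List.slice_to_neg_ofNat _ 2 (by omega), hlen2, List.take_left,
            hcs, List.map_reverse, parse_map _ hdig_lt]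
  obtain ⟨hA1, hA2⟩ := hA_pieces
  -- assemble A
  unfold handle_complex_opcode
  simp only [hA1, hA2, PySem.List.slice?_none_none_neg_one, Option.getD_some,
    List.reverse_reverse]
  rw [← altDigits_eq_digits]
  -- the padding: A's element loop equals B's tail slice
  rw [PySem.List.slice_from_natCast]
  by_cases hpad : (altDigits r).length < ((argmodeMap.get? (d : Int)).getD []).length
  · rw [if_pos hpad,
        PySem.List.foldl_append_singleton_eq_map (fun i => PySem.List.pyGetD ((argmodeMap.get? (d : Int)).getD []) i 0),
        PySem.List.map_pyGetD_pyRange' _ 0 (by positivity), Int.toNat_natCast]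
  · rw [if_neg hpad, List.drop_eq_nil_of_le (by omega), List.append_nil]
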